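-- pv_equiv track=rewrite | github.com/BoB-Dev-Top30/Firewall | MONITOR/Process_Log.py | get_chaining_data
-- ===== SOURCE A (Python) =====
-- def get_chaining_data(processed_log):
--
--     Input = 0
--     Forward = 0
--     Output = 0
--
--     for log in processed_log:
--         if(log["chain"] == "INPUT"):
--             Input+=1
--             continue
--         elif(log["chain"] == "FORWARD"):
--             Forward+=1
--             continue
--
--         elif(log["chain"]=="OUTPUT"):
--             Output+=1
--
--     return Input, Forward, Output
-- ===== SOURCE B (Python) =====
-- def get_chaining_data(processed_log):
--     return (sum(1 for log in processed_log if log["chain"] == "INPUT"),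
--             sum(1 for log in processed_log if log["chain"] == "FORWARD"),
--             sum(1 for log in processed_log if log["chain"] == "OUTPUT"))
-- ===== Notes on version B (the rewrite author's own statement) =====
-- stated objective: idiomatic
-- what changed: Replaces the single accumulating loop over three mutable counters with three independent filtering generator-expression scans, one per chain type.
import Mathlib
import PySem

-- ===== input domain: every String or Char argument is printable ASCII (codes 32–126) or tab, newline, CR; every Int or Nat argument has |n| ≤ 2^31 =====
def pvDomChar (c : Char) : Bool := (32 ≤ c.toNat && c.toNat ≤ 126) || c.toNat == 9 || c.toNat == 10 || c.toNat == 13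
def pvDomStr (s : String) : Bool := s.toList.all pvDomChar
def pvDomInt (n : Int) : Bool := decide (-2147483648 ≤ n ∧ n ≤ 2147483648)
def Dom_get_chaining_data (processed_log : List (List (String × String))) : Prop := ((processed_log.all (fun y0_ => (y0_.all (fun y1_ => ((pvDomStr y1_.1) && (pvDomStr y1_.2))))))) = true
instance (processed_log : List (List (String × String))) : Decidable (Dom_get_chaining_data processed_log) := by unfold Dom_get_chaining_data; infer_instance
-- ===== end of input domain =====

-- ===== PORT A =====
-- B replaces A's single accumulating loop by three independent filtering scans (idiomatic decomposition; same cost).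
-- Python's log["chain"] (KeyError when absent) is ported as first-match lookup PySem.Dict.get?; Pre_ excludes the KeyError inputs.
def get_chaining_data (processed_log : List (List (String × String))) : Int × Int × Int :=
  processed_log.foldl
    (fun acc log =>
      if (PySem.Dict.mk log).get? "chain" == some "INPUT" then (acc.1 + 1, acc.2.1, acc.2.2)
      else if (PySem.Dict.mk log).get? "chain" == some "FORWARD" then (acc.1, acc.2.1 + 1, acc.2.2)
      else if (PySem.Dict.mk log).get? "chain" == some "OUTPUT" then (acc.1, acc.2.1, acc.2.2 + 1)
      else acc)
    (0, 0, 0)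

-- ===== PORT B =====
def get_chaining_data_alt (processed_log : List (List (String × String))) : Int × Int × Int :=
  (((processed_log.filter (fun log => (PySem.Dict.mk log).get? "chain" == some "INPUT")).length : Int),
   ((processed_log.filter (fun log => (PySem.Dict.mk log).get? "chain" == some "FORWARD")).length : Int),
   ((processed_log.filter (fun log => (PySem.Dict.mk log).get? "chain" == some "OUTPUT")).length : Int))

-- ===== PRECONDITION & SPEC =====
-- Pre_ excludes inputs where some log lacks the key "chain": Python A raises KeyError there.
def Pre_get_chaining_data (processed_log : List (List (String × String))) : Prop :=
  (processed_log.all (fun log => log.any (fun p => p.1 == "chain"))) = true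
instance (processed_log : List (List (String × String))) : Decidable (Pre_get_chaining_data processed_log) := by unfold Pre_get_chaining_data; infer_instance
def pvWitness_get_chaining_data : (List (List (String × String))) :=
  [[("chain", "INPUT")], [("chain", "OUTPUT")], [("chain", "x")]]
def Spec_get_chaining_data (processed_log : List (List (String × String))) (out : Int × Int × Int) : Prop := out = get_chaining_data_alt processed_log
instance (processed_log : List (List (String × String))) (out : Int × Int × Int) : Decidable (Spec_get_chaining_data processed_log out) := by unfold Spec_get_chaining_data; infer_instance

-- ===== CLAIM (what is proved, stated in full; the proofs are below) =====
def Claim_equal_get_chaining_data : Prop := ∀ (processed_log : List (List (String × String))), Dom_get_chaining_data processed_log → Pre_get_chaining_data processed_log → Spec_get_chaining_data processed_log (get_chaining_data processed_log)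

-- ===== LEMMAS AND PROOFS =====
theorem gcd_foldl_shift (pl : List (List (String × String))) :
    ∀ a b c : Int,
      pl.foldl
        (fun acc log =>
          if (PySem.Dict.mk log).get? "chain" == some "INPUT" then (acc.1 + 1, acc.2.1, acc.2.2)
          else if (PySem.Dict.mk log).get? "chain" == some "FORWARD" then (acc.1, acc.2.1 + 1, acc.2.2)
          else if (PySem.Dict.mk log).get? "chain" == some "OUTPUT" then (acc.1, acc.2.1, acc.2.2 + 1)
          else acc)
        (a, b, c)
      = (a + ((pl.filter (fun log => (PySem.Dict.mk log).get? "chain" == some "INPUT")).length : Int),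
         b + ((pl.filter (fun log => (PySem.Dict.mk log).get? "chain" == some "FORWARD")).length : Int),
         c + ((pl.filter (fun log => (PySem.Dict.mk log).get? "chain" == some "OUTPUT")).length : Int)) := by
  induction pl with
  | nil => intro a b c; simp
  | cons hd tl ih =>
    intro a b c
    simp only [List.foldl_cons, List.filter_cons]
    by_cases h1 : ((PySem.Dict.mk hd).get? "chain" == some "INPUT") = true
    · have h2 : ¬ ((PySem.Dict.mk hd).get? "chain" == some "FORWARD") = true := by simp_all
      have h3 : ¬ ((PySem.Dict.mk hd).get? "chain" == some "OUTPUT") = true := by simp_all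
      simp only [h1, h2, h3, if_true, if_false, ite_true, ite_false, if_pos, List.length_cons]
      rw [ih]
      simp [Prod.ext_iff]
      omega
    · by_cases h2 : ((PySem.Dict.mk hd).get? "chain" == some "FORWARD") = true
      · have h3 : ¬ ((PySem.Dict.mk hd).get? "chain" == some "OUTPUT") = true := by simp_all
        simp only [h1, h2, h3, ite_true, ite_false, List.length_cons]
        rw [ih]
        simp [Prod.ext_iff]
        omega
      · by_cases h3 : ((PySem.Dict.mk hd).get? "chain" == some "OUTPUT") = true
        · simp only [h1, h2, h3, ite_true, ite_false, List.length_cons]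
          rw [ih]
          simp [Prod.ext_iff]
          omega
        · simp only [h1, h2, h3, ite_false]
          rw [ih]
          simp

-- ===== VERDICT (by name: the statement is the Claim_ definition above) =====
theorem get_chaining_data_spec : Claim_equal_get_chaining_data := by
  intro pl _ _
  unfold Spec_get_chaining_data get_chaining_data get_chaining_data_alt
  rw [gcd_foldl_shift]
  simp
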